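-- pv_equiv track=rewrite | github.com/talkad/OMPify | database_creator/parsers/HPCorpus_parser/parse_tools.py | count_newlines
-- ===== SOURCE A (Python) =====
-- def count_newlines(code):
--     counter = 0
--
--     for letter in code:
--         if letter == '\n':
--             counter += 1
--             continue
--
--         return counter
--
--     return counter
--
-- code = '''
-- type_591 func_466() {
--     type_591 arr_448[num_589 + num_992];
--     type_591 var_15, var_561;
--     type_591 var_567, var_518;
--     type_591 var_782 = num_699;
--
--     for (var_15 = num_699; var_15 < num_589; var_15++) {
--         arr_448[var_15] = num_174;
--     }
--
--     for (var_561 = num_589; var_561 > num_699; var_561 -= num_917) {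
--         var_518 = num_699;
--
--         var_15 = var_561;
--         for (;;) {
--             var_518 += arr_448[var_15] * num_948;
--             var_567 = num_146 * var_15 - num_992;
--
--             arr_448[var_15] = var_518 % var_567;
--             var_518 /= var_567;
--             var_15--;
--             if (var_15 == num_699) break;
--             var_518 *= var_15;
--         }
--         func_725(str_237, var_782 + var_518 / num_948);
--         var_782 = var_518 % num_948;
--     }
--
--     return num_699;
-- }
--
-- '''
-- ===== SOURCE B (Python) =====
-- def count_newlines(code):
--     # Binary search for the largest i such that the first i characters are all
--     # newlines; the predicate code[:i] == '\n' * i is monotone (true up to the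
--     # length of the leading newline run, false beyond), so binary search is exact.
--     lo, hi = 0, len(code)
--     while lo < hi:
--         mid = (lo + hi + 1) // 2
--         if code[:mid] == '\n' * mid:
--             lo = mid
--         else:
--             hi = mid - 1
--     return lo
-- ===== Notes on version B (the rewrite author's own statement) =====
-- stated objective: alternative
-- what changed: Replaced the linear left-to-right scan with a binary search over prefix lengths for the largest i whose length-i prefix consists entirely of newline characters, exploiting that this prefix predicate is monotone in i.
import Mathlib
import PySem

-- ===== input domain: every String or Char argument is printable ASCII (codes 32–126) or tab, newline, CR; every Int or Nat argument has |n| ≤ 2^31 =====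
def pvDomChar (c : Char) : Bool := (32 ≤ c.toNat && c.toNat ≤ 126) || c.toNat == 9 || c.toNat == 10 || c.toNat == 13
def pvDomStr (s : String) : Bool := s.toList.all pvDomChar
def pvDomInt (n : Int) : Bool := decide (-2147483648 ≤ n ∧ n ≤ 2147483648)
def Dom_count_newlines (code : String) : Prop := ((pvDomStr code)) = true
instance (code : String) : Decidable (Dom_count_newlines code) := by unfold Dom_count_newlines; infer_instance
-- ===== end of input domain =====

-- B replaces A's left-to-right counting loop by a binary search over prefix lengths
-- for the largest i with code[:i] == '\n'*i (objective: alternative algorithm).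

-- ===== PORT A =====
-- A's for-loop with early return: walk the characters, count leading '\n', stop at the first other char
def countNlLoop : List Char → Int → Int
  | [], counter => counter
  | letter :: rest, counter =>
      if letter = '\n' then countNlLoop rest (counter + 1) else counter

def count_newlines (code : String) : Int :=
  countNlLoop code.toList 0

-- ===== PORT B =====
-- B's while-loop; lo and hi are Python ints that stay in [0, len(code)], ported as Nat (exact).
-- code[:mid] with 0 ≤ mid is exactly List.take mid on the character list, and
-- '\n' * mid is exactly List.replicate mid '\n' (both ported by hand, exact on this domain).
def cnlSearch (l : List Char) (lo hi : Nat) : Nat :=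
  if lo < hi then
    let mid := (lo + hi + 1) / 2
    if l.take mid = List.replicate mid '\n' then cnlSearch l mid hi
    else cnlSearch l lo (mid - 1)
  else lo
termination_by hi - lo
decreasing_by all_goals omega

def count_newlines_alt (code : String) : Int :=
  -- len(code) = code.toList.length (PySem.Chars.len_eq)
  (cnlSearch code.toList 0 code.toList.length : Int)

-- ===== PRECONDITION & SPEC =====
def Spec_count_newlines (code : String) (out : Int) : Prop := out = count_newlines_alt code
instance (code : String) (out : Int) : Decidable (Spec_count_newlines code out) := by unfold Spec_count_newlines; infer_instance

-- ===== CLAIM =====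
def Claim_equal_count_newlines : Prop := ∀ (code : String), Dom_count_newlines code → Spec_count_newlines code (count_newlines code)

-- ===== LEMMAS AND PROOFS =====

-- the length of the leading run of newlines
def nlRun (l : List Char) : Nat := (l.takeWhile (fun c => c = '\n')).length

theorem nlRun_le_length (l : List Char) : nlRun l ≤ l.length := by
  induction l with
  | nil => simp [nlRun]
  | cons h t ih =>
      by_cases hh : h = '\n'
      · simp only [nlRun, List.takeWhile_cons, hh] at ih ⊢
        simp only [decide_true, if_true, List.length_cons, List.length]
        omega
      · simp [nlRun, hh]

-- the binary-search predicate is monotone: the prefix of length m is all newlines iff m ≤ nlRun l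
theorem take_eq_replicate_iff (l : List Char) (m : Nat) :
    l.take m = List.replicate m '\n' ↔ m ≤ nlRun l := by
  induction l generalizing m with
  | nil =>
      cases m with
      | zero => simp [nlRun]
      | succ m => simp [nlRun, List.replicate_succ]
  | cons h t ih =>
      cases m with
      | zero => simp
      | succ m =>
          by_cases hh : h = '\n'
          · simp [List.replicate_succ, nlRun, hh, ih]
          · simp [List.replicate_succ, nlRun, hh]

theorem cnlSearch_eq (l : List Char) (lo hi : Nat)
    (h1 : lo ≤ nlRun l) (h2 : nlRun l ≤ hi) : cnlSearch l lo hi = nlRun l := by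
  rw [cnlSearch]
  by_cases hlt : lo < hi
  · rw [if_pos hlt]
    by_cases hp : l.take ((lo + hi + 1) / 2) = List.replicate ((lo + hi + 1) / 2) '\n'
    · rw [if_pos hp]
      exact cnlSearch_eq l _ hi ((take_eq_replicate_iff l _).mp hp) h2
    · rw [if_neg hp]
      have : ¬ ((lo + hi + 1) / 2 ≤ nlRun l) := fun hle =>
        hp ((take_eq_replicate_iff l _).mpr hle)
      exact cnlSearch_eq l lo _ h1 (by omega)
  · rw [if_neg hlt]; omega
termination_by hi - lo
decreasing_by all_goals omega

theorem countNlLoop_eq (l : List Char) (c : Int) :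
    countNlLoop l c = c + (nlRun l : Int) := by
  induction l generalizing c with
  | nil => simp [countNlLoop, nlRun]
  | cons h t ih =>
      by_cases hh : h = '\n'
      · simp [countNlLoop, hh, ih, nlRun]; ring
      · simp [countNlLoop, hh, nlRun]

-- ===== VERDICT =====
theorem count_newlines_spec : Claim_equal_count_newlines := by
  intro code _
  unfold Spec_count_newlines count_newlines count_newlines_alt
  rw [countNlLoop_eq,
    cnlSearch_eq code.toList 0 code.toList.length (Nat.zero_le _) (nlRun_le_length _)]
  simp
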